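-- pv_equiv track=rewrite | github.com/yasufumi-nakata/Pytra | src/pytra/std/re.py | _is_dotted_ident
-- ===== SOURCE A (Python) =====
-- def _is_ident(s: str) -> bool:
--     if s == "":
--         return False
--     h = s[0:1]
--     is_head_alpha = ("a" <= h <= "z") or ("A" <= h <= "Z")
--     if not (is_head_alpha or h == "_"):
--         return False
--     for ch in s[1:]:
--         is_alpha = ("a" <= ch <= "z") or ("A" <= ch <= "Z")
--         is_digit = ("0" <= ch <= "9")
--         if not (is_alpha or is_digit or ch == "_"):
--             return False
--     return True
--
-- def _is_dotted_ident(s: str) -> bool: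
--     if s == "":
--         return False
--     part = ""
--     for ch in s:
--         if ch == ".":
--             if not _is_ident(part):
--                 return False
--             part = ""
--             continue
--         part += ch
--     if not _is_ident(part):
--         return False
--     if part == "":
--         return False
--     return True
-- ===== SOURCE B (Python) =====
-- def _is_dotted_ident(s: str) -> bool:
--     # tokenize-then-validate: split on '.' and require every part to be an identifier
--     # (''.split('.') == [''] and ''.isidentifier() is False, so empty strings/parts fall out)
--     return all(p.isidentifier() for p in s.split('.'))
-- ===== Notes on version B (the rewrite author's own statement) =====
-- stated objective: idiomatic
-- what changed: Replaced the fused single-pass scan that accumulates a segment buffer and validates it at each dot separator with a two-phase tokenize-then-validate: str.split on the dot followed by all parts passing str.isidentifier (which on the printable-ASCII domain matches the original character classes exactly).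
import Mathlib
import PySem

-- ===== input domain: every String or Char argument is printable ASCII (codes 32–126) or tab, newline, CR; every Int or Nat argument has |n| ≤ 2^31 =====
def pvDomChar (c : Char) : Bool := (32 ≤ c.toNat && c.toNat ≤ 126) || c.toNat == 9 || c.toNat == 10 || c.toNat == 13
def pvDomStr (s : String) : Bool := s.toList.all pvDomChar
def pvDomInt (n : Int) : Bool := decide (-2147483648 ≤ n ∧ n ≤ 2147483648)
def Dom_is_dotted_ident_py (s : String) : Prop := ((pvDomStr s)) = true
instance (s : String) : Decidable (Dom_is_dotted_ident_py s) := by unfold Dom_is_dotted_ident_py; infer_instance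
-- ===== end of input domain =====

-- B replaces A's fused scan-and-accumulate pass with idiomatic tokenize-then-validate
-- (split on the dot, then require each part to be an identifier); plainer shape, and the
-- timing run measured B faster by a constant factor (C-level split/isidentifier vs a Python char loop).

-- ===== PORT A =====
-- _is_ident's for-loop over s[1:] with early 'return False' (returns True when the loop ends)
def pvIsIdentLoopA : List Char → Bool
  | [] => true
  | ch :: rest =>
    let isAlpha := ('a' ≤ ch && ch ≤ 'z') || ('A' ≤ ch && ch ≤ 'Z')
    let isDigit := ('0' ≤ ch && ch ≤ '9')
    if !(isAlpha || isDigit || ch == '_') then false else pvIsIdentLoopA rest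

-- _is_ident; for nonempty s the slice s[0:1] is the one-char string of the head, and
-- Python's string comparison "a" <= h <= "z" on a one-char string is the char comparison
def pvIsIdentA : List Char → Bool
  | [] => false
  | h :: rest =>
    let isHeadAlpha := ('a' ≤ h && h ≤ 'z') || ('A' ≤ h && h ≤ 'Z')
    if !(isHeadAlpha || h == '_') then false else pvIsIdentLoopA rest

-- _is_dotted_ident's for-loop over s, accumulating 'part' (++ [ch] = part += ch);
-- the [] case is the code after the loop: two checks, then 'return True'
def pvDottedLoopA : List Char → List Char → Bool
  | part, [] => if !pvIsIdentA part then false else if part == [] then false else true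
  | part, ch :: rest =>
    if ch == '.' then (if !pvIsIdentA part then false else pvDottedLoopA [] rest)
    else pvDottedLoopA (part ++ [ch]) rest

def is_dotted_ident_py (s : String) : Bool :=
  if s.toList == [] then false else pvDottedLoopA [] s.toList

-- ===== PORT B =====
-- p.isidentifier(), exact on the printable-ASCII domain: nonempty, head in [A-Za-z_],
-- tail in [A-Za-z0-9_]
def pvIsIdentifierB : List Char → Bool
  | [] => false
  | c :: rest => (c.isAlpha || c == '_') && rest.all (fun ch => ch.isAlpha || ch.isDigit || ch == '_')

-- s.split('.') is PySem.Chars.splitOn on the character list (sep '.' is nonempty)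
def is_dotted_ident_py_alt (s : String) : Bool :=
  (PySem.Chars.splitOn s.toList ['.']).all pvIsIdentifierB

-- ===== PRECONDITION & SPEC =====
def Spec_is_dotted_ident_py (s : String) (out : Bool) : Prop := out = is_dotted_ident_py_alt s
instance (s : String) (out : Bool) : Decidable (Spec_is_dotted_ident_py s out) := by unfold Spec_is_dotted_ident_py; infer_instance

-- ===== CLAIM (what is proved, stated in full; the proofs are below) =====
def Claim_equal_is_dotted_ident_py : Prop := ∀ (s : String), Dom_is_dotted_ident_py s → Spec_is_dotted_ident_py s (is_dotted_ident_py s)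

-- ===== LEMMAS AND PROOFS =====

-- proof-side recursive characterisation of splitting on '.'
def pvSplitDot : List Char → List (List Char)
  | [] => [[]]
  | c :: rest => if c = '.' then [] :: pvSplitDot rest else (pvSplitDot rest).modifyHead (c :: ·)

theorem pv_modifyHead_modifyHead {α : Type} (f g : α → α) (xs : List α) :
    (xs.modifyHead g).modifyHead f = xs.modifyHead (fun x => f (g x)) := by
  cases xs <;> simp

theorem pv_modifyHead_id {α : Type} (xs : List α) :
    xs.modifyHead (fun x => x) = xs := by
  cases xs <;> simp

theorem pv_splitOn_go_eq (fuel : Nat) :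
    ∀ (l cur : List Char) (acc : List (List Char)), l.length ≤ fuel →
    PySem.Chars.splitOn.go ['.'] fuel l cur acc
      = acc.reverse ++ (pvSplitDot l).modifyHead (cur.reverse ++ ·) := by
  induction fuel with
  | zero =>
    intro l cur acc h
    have : l = [] := List.eq_nil_of_length_eq_zero (Nat.le_zero.mp h)
    subst this
    simp [PySem.Chars.splitOn.go, pvSplitDot]
  | succ n ih =>
    intro l cur acc h
    cases l with
    | nil => simp [PySem.Chars.splitOn.go, pvSplitDot]
    | cons c rest =>
      simp only [PySem.Chars.splitOn.go, List.isPrefixOf, List.length_cons,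
        List.length_nil, Nat.zero_add, List.drop_succ_cons, List.drop_zero] at *
      by_cases hc : c = '.'
      · subst hc
        simp only [beq_self_eq_true, Bool.and_true, if_pos]
        rw [ih rest [] (cur.reverse :: acc) (by omega)]
        simp [pvSplitDot, pv_modifyHead_id]
      · rw [if_neg (by simp [Bool.and_true]; exact fun h' => hc h'.symm)]
        rw [ih rest (c :: cur) acc (by omega)]
        have hs : pvSplitDot (c :: rest) = (pvSplitDot rest).modifyHead (c :: ·) := by
          simp [pvSplitDot, hc]
        rw [hs, pv_modifyHead_modifyHead]
        have hfun : (fun x => (c :: cur).reverse ++ x) = (fun x => cur.reverse ++ (c :: x)) := by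
          funext x; simp
        rw [hfun]

theorem pv_splitOn_eq (l : List Char) :
    PySem.Chars.splitOn l ['.'] = pvSplitDot l := by
  unfold PySem.Chars.splitOn
  rw [pv_splitOn_go_eq (l.length + 1) l [] [] (by omega)]
  simp [pv_modifyHead_id]

-- the two character classifications agree on every character
theorem pv_alpha_eq (c : Char) :
    (('a' ≤ c && c ≤ 'z') || ('A' ≤ c && c ≤ 'Z')) = c.isAlpha := by
  simp only [Char.isAlpha, Char.isLower, Char.isUpper, Char.le_def, ge_iff_le, Bool.decide_and]
  rw [Bool.or_comm]

theorem pv_digit_eq (c : Char) : ('0' ≤ c && c ≤ '9') = c.isDigit := by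
  simp only [Char.isDigit, Char.le_def]

theorem pv_identLoop_eq (l : List Char) :
    pvIsIdentLoopA l = l.all (fun ch => ch.isAlpha || ch.isDigit || ch == '_') := by
  induction l with
  | nil => rfl
  | cons c rest ih =>
    simp only [pvIsIdentLoopA, List.all_cons, ← ih, pv_alpha_eq, pv_digit_eq]
    by_cases h : (c.isAlpha || c.isDigit || c == '_') = true
    · simp [h]
    · simp [Bool.not_eq_true] at h; simp [h]

theorem pv_isIdent_eq (l : List Char) : pvIsIdentA l = pvIsIdentifierB l := by
  cases l with
  | nil => rfl
  | cons c rest =>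
    simp only [pvIsIdentA, pvIsIdentifierB, pv_identLoop_eq, pv_alpha_eq]
    by_cases h : (c.isAlpha || c == '_') = true
    · simp [h]
    · simp [Bool.not_eq_true] at h; simp [h]

theorem pv_dottedLoop_eq (l : List Char) :
    ∀ part, pvDottedLoopA part l = ((pvSplitDot l).modifyHead (part ++ ·)).all pvIsIdentifierB := by
  induction l with
  | nil =>
    intro part
    simp only [pvDottedLoopA, pvSplitDot, List.modifyHead_cons, List.all_cons, List.all_nil,
      Bool.and_true, List.append_nil, pv_isIdent_eq]
    cases h : pvIsIdentifierB part with
    | false => simp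
    | true =>
      have hne : (part == ([] : List Char)) = false := by
        cases part with
        | nil => simp [pvIsIdentifierB] at h
        | cons a l => simp
      simp [hne]
  | cons c rest ih =>
    intro part
    by_cases hc : c = '.'
    · subst hc
      have hsplit : pvSplitDot ('.' :: rest) = [] :: pvSplitDot rest := by simp [pvSplitDot]
      have hid : List.modifyHead (fun x => [] ++ x) (pvSplitDot rest) = pvSplitDot rest := by
        cases pvSplitDot rest <;> simp
      simp only [pvDottedLoopA, beq_self_eq_true, if_pos, hsplit, List.modifyHead_cons,
        List.all_cons, List.append_nil, pv_isIdent_eq, ih [], hid]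
      cases pvIsIdentifierB part <;> simp
    · have hne : (c == '.') = false := by simp [hc]
      have hsplit : pvSplitDot (c :: rest) = (pvSplitDot rest).modifyHead (c :: ·) := by
        simp [pvSplitDot, hc]
      have hfun : (fun x => (part ++ [c]) ++ x) = (fun x => part ++ c :: x) := by
        funext x; simp
      simp only [pvDottedLoopA, hne, Bool.false_eq_true, if_false, hsplit,
        ih (part ++ [c]), pv_modifyHead_modifyHead, hfun]

-- ===== VERDICT (by name: the statement is the Claim_ definition above) =====
theorem is_dotted_ident_py_spec : Claim_equal_is_dotted_ident_py := by
  intro s _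
  show is_dotted_ident_py s = is_dotted_ident_py_alt s
  unfold is_dotted_ident_py is_dotted_ident_py_alt
  rw [pv_splitOn_eq]
  cases h : s.toList with
  | nil => simp [pvSplitDot, pvIsIdentifierB]
  | cons c rest =>
    have hmain := pv_dottedLoop_eq (c :: rest) []
    simp only [List.nil_append] at hmain
    simp only [hmain, pv_modifyHead_id]
    simp
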